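-- pv_equiv track=rewrite | github.com/stereotype441/opengl-api | api_exec.py | kill_if_zeros
-- ===== SOURCE A (Python) =====
-- def kill_if_zeros(lines):
--     killing = False
--     for line in lines:
--         if line == '#if 0':
--             assert not killing
--             killing = True
--             continue
--         if line.startswith('#if'):
--             assert not killing
--         if line == '#endif' and killing:
--             killing = False
--             continue
--         if not killing:
--             yield line
-- ===== SOURCE B (Python) =====
-- def kill_if_zeros(lines):
--     it = iter(lines)
--     for line in it:
--         if line == '#if 0':
--             for inner in it:
--                 if inner == '#endif':
--                     break
--                 assert not inner.startswith('#if')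
--         else:
--             yield line
-- ===== Notes on version B (the rewrite author's own statement) =====
-- stated objective: alternative
-- what changed: Replaces the boolean 'killing' flag threaded through one flat loop by two nested loops sharing a single iterator: an inner loop consumes a killed block up to '#endif', so no state variable remains.
import Mathlib
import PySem

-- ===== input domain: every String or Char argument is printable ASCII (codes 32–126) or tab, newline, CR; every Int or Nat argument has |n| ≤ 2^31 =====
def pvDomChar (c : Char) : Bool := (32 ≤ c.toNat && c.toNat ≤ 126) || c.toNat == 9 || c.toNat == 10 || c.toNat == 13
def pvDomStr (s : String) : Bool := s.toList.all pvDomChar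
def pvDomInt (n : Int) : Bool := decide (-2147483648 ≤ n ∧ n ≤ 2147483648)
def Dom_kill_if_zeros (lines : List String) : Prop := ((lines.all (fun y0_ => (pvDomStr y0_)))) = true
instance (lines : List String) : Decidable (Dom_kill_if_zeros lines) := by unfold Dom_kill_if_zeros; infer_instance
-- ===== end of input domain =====

-- B replaces A's 'killing' flag and flat loop by two nested loops sharing one iterator (no state variable); same values, same cost.
-- Generator semantics: the equivalence is about the list of yielded lines.

-- ===== PORT A =====
-- A's generator loop, with the 'killing' flag as a recursion parameter.
-- The two 'assert not killing' statements raise exactly on inputs excluded by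
-- Pre_kill_if_zeros; on admitted inputs they are no-ops and are dropped here.
def kill_if_zeros_go (killing : Bool) : List String → List String
  | [] => []
  | line :: rest =>
    if line = "#if 0" then
      kill_if_zeros_go true rest
    else if line = "#endif" ∧ killing then
      kill_if_zeros_go false rest
    else if killing = false then
      line :: kill_if_zeros_go killing rest
    else
      kill_if_zeros_go killing rest

def kill_if_zeros (lines : List String) : List String :=
  kill_if_zeros_go false lines

-- ===== PORT B =====
-- B's inner 'for inner in it' loop: consume lines up to and including '#endif',
-- returning the remaining iterator (its assert raises exactly outside Pre_, no-op here).
def kill_if_zeros_skip : List String → List String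
  | [] => []
  | inner :: rest => if inner = "#endif" then rest else kill_if_zeros_skip rest

theorem kill_if_zeros_skip_len_le : ∀ (l : List String), (kill_if_zeros_skip l).length ≤ l.length
  | [] => Nat.le_refl _
  | inner :: rest => by
    unfold kill_if_zeros_skip
    split
    · exact Nat.le_succ _
    · exact Nat.le_trans (kill_if_zeros_skip_len_le rest) (Nat.le_succ _)

-- B's outer 'for line in it' loop.
def kill_if_zeros_alt : List String → List String
  | [] => []
  | line :: rest =>
    if line = "#if 0" then
      kill_if_zeros_alt (kill_if_zeros_skip rest)
    else
      line :: kill_if_zeros_alt rest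
termination_by l => l.length
decreasing_by
  · exact Nat.lt_succ_of_le (kill_if_zeros_skip_len_le rest)
  · exact Nat.lt_succ_of_le (Nat.le_refl _)

-- ===== PRECONDITION & SPEC =====
-- Pre_ excludes exactly the inputs on which A's asserts raise AssertionError:
-- a line starting with "#if" occurring inside a '#if 0' block (no "#endif" between).
-- B's assert raises on the same inputs.
def Pre_kill_if_zeros (lines : List String) : Prop :=
  ∀ j < lines.length, ∀ i < j,
    lines.getD i "" = "#if 0" →
    PySem.Str.startswith (lines.getD j "") "#if" = true →
    ∃ k < j, i < k ∧ lines.getD k "" = "#endif"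
instance (lines : List String) : Decidable (Pre_kill_if_zeros lines) := by
  unfold Pre_kill_if_zeros; exact Nat.decidableBallLT _ _

def pvWitness_kill_if_zeros : List String :=
  ["#if x", "a", "#if 0", "dead", "#endif", "b"]

def Spec_kill_if_zeros (lines : List String) (out : List String) : Prop := out = kill_if_zeros_alt lines
instance (lines : List String) (out : List String) : Decidable (Spec_kill_if_zeros lines out) := by unfold Spec_kill_if_zeros; infer_instance

-- ===== CLAIM (what is proved, stated in full; the proofs are below) =====
def Claim_equal_kill_if_zeros : Prop := ∀ (lines : List String), Dom_kill_if_zeros lines → Pre_kill_if_zeros lines → Spec_kill_if_zeros lines (kill_if_zeros lines)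

-- ===== LEMMAS AND PROOFS =====

-- The ports agree on every input (Pre_ is only needed for faithfulness to the
-- raising Pythons): A with killing=false matches B's outer loop, and A with
-- killing=true matches B resumed after the inner skip loop.
theorem kill_if_zeros_go_eq : ∀ (l : List String),
    kill_if_zeros_go false l = kill_if_zeros_alt l ∧
    kill_if_zeros_go true l = kill_if_zeros_alt (kill_if_zeros_skip l)
  | [] => by simp [kill_if_zeros_go, kill_if_zeros_alt, kill_if_zeros_skip]
  | line :: rest => by
    obtain ⟨ihf, iht⟩ := kill_if_zeros_go_eq rest
    constructor
    · rw [kill_if_zeros_go, kill_if_zeros_alt]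
      by_cases h0 : line = "#if 0"
      · simp [h0, iht]
      · simp [h0, ihf]
    · rw [kill_if_zeros_go, kill_if_zeros_skip]
      by_cases h0 : line = "#if 0"
      · simp [h0, iht]
      · by_cases he : line = "#endif"
        · simp [he, ihf]
        · simp [h0, he, iht]

-- ===== VERDICT (by name: the statement is the Claim_ definition above) =====
theorem kill_if_zeros_spec : Claim_equal_kill_if_zeros := by
  intro lines _ _
  unfold Spec_kill_if_zeros kill_if_zeros
  exact (kill_if_zeros_go_eq lines).1
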